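-- pv_equiv track=rewrite | github.com/GarvynY/Jarvis | Jarvis/pythonclaw/templates/skills/data/fx_monitor/research/baseline_recorder.py | _finding_key_from_source
-- ===== SOURCE A (Python) =====
-- from typing import Any
--
-- def _finding_key_from_source(source: Any) -> str:
--     text = str(source or "")
--     marker = "finding_key="
--     if marker not in text:
--         return ""
--     value = text.split(marker, 1)[1]
--     for sep in ("|", ",", ";", " "):
--         value = value.split(sep, 1)[0]
--     return value.strip()
-- ===== SOURCE B (Python) =====
-- from typing import Any
--
-- def _finding_key_from_source(source: Any) -> str:
--     text = str(source or "")
--     marker = "finding_key="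
--     idx = text.find(marker)
--     if idx < 0:
--         return ""
--     rest = text[idx + len(marker):]
--     end = 0
--     while end < len(rest) and rest[end] not in ("|", ",", ";", " "):
--         end += 1
--     return rest[:end].strip()
-- ===== Notes on version B (the rewrite author's own statement) =====
-- stated objective: alternative
-- what changed: Instead of splitting the string on the marker and then running four sequential split(sep,1)[0] passes, B locates the marker with str.find, slices the suffix directly, and advances a single index until the first separator character, returning the stripped prefix.
import Mathlib
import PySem

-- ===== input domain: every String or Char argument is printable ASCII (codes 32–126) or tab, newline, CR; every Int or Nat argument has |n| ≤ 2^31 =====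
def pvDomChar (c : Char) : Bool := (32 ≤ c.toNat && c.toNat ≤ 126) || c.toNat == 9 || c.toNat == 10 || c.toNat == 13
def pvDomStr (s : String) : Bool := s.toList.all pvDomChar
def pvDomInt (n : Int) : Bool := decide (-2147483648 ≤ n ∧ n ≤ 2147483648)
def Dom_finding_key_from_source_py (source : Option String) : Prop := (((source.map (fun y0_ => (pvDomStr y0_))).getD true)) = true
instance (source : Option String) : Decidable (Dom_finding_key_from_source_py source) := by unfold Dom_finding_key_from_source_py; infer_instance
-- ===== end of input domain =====

-- B locates the marker with str.find and scans the suffix with a single index until the first separator character, instead of A's split-on-marker followed by four split(sep,1)[0] passes; same return value everywhere.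

-- ===== PORT A =====
def finding_key_from_source_py (source : Option String) : String :=
  let text := match source with
    | none => ""
    | some s => if s = "" then "" else s
  let marker := "finding_key="
  if PySem.Str.isIn marker text = false then ""
  else
    let value := ((PySem.Str.splitMax? text marker 1).getD []).getD 1 ""
    let value := ["|", ",", ";", " "].foldl
      (fun v sep => ((PySem.Str.splitMax? v sep 1).getD []).getD 0 "") value
    PySem.Str.strip value

-- ===== PORT B =====
-- the 'while end < len(rest) and rest[end] not in (...)' loop of Source B, as the obvious structural recursion
def fksScanEnd : List Char → Nat
  | [] => 0
  | c :: t => if ['|', ',', ';', ' '].contains c then 0 else fksScanEnd t + 1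

def finding_key_from_source_py_alt (source : Option String) : String :=
  let text := match source with
    | none => ""
    | some s => if s = "" then "" else s
  let marker := "finding_key="
  let idx := PySem.Str.find text marker
  if idx < 0 then ""
  else
    let rest := PySem.Str.slice text (some (idx + (PySem.Str.len marker : Int))) none
    let e := fksScanEnd rest.toList
    PySem.Str.strip (PySem.Str.slice rest none (some (e : Int)))

-- ===== PRECONDITION & SPEC =====
def Spec_finding_key_from_source_py (source : Option String) (out : String) : Prop := out = finding_key_from_source_py_alt source
instance (source : Option String) (out : String) : Decidable (Spec_finding_key_from_source_py source out) := by unfold Spec_finding_key_from_source_py; infer_instance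

-- ===== CLAIM (what is proved, stated in full; the proofs are below) =====
def Claim_equal_finding_key_from_source_py : Prop := ∀ (source : Option String), Dom_finding_key_from_source_py source → Spec_finding_key_from_source_py source (finding_key_from_source_py source)

-- ===== LEMMAS AND PROOFS =====

theorem go_zero (sep : List Char) (fuel : Nat) (l : List Char) (acc : List (List Char)) :
    PySem.Chars.splitOnMax.go sep fuel 0 l [] acc = (l :: acc).reverse := by
  cases fuel <;> cases l <;> simp [PySem.Chars.splitOnMax.go]

theorem go_one (c : Char) (fuel : Nat) (l cur : List Char) (h : l.length < fuel) :
    ∃ rest, PySem.Chars.splitOnMax.go [c] fuel 1 l cur [] =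
      (cur.reverse ++ l.takeWhile (· ≠ c)) :: rest := by
  induction fuel generalizing l cur with
  | zero => omega
  | succ n ih =>
    cases l with
    | nil => exact ⟨[], by simp [PySem.Chars.splitOnMax.go]⟩
    | cons a t =>
      by_cases hac : a = c
      · subst hac
        refine ⟨[t], ?_⟩
        simp [PySem.Chars.splitOnMax.go, List.isPrefixOf, go_zero, List.takeWhile]
      · obtain ⟨rest, hr⟩ := ih t (a :: cur) (by simpa using Nat.lt_of_succ_lt_succ h)
        refine ⟨rest, ?_⟩
        simp only [PySem.Chars.splitOnMax.go, List.isPrefixOf]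
        rw [if_neg (by simp), if_neg (by simp; exact fun h => hac h.symm)]
        rw [hr]
        simp [List.takeWhile, hac]

theorem splitA (v sep : String) (c : Char) (hs : sep.toList = [c]) :
    ((PySem.Str.splitMax? v sep 1).getD []).getD 0 "" =
      String.ofList (v.toList.takeWhile (· ≠ c)) := by
  obtain ⟨rest, hr⟩ := go_one c (v.length + 1) v.toList []
    (by rw [String.length_toList]; omega)
  simp only [PySem.Str.splitMax?, PySem.Chars.splitMax?, hs, PySem.Chars.splitOnMax]
  norm_num
  rw [hr]
  simp

theorem loop_eq (v : String) :
    ["|", ",", ";", " "].foldl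
        (fun v sep => ((PySem.Str.splitMax? v sep 1).getD []).getD 0 "") v =
      String.ofList (v.toList.takeWhile
        (fun ch => !(['|', ',', ';', ' '].contains ch))) := by
  simp only [List.foldl]
  rw [splitA v "|" '|' rfl,
      splitA _ "," ',' rfl,
      splitA _ ";" ';' rfl,
      splitA _ " " ' ' rfl]
  simp only [String.toList_ofList, List.takeWhile_takeWhile]
  have hp : ∀ p q : Char → Bool, p = q →
      List.takeWhile p v.toList = List.takeWhile q v.toList := fun p q h => by rw [h]
  rw [hp _ (fun ch => !(['|', ',', ';', ' '].contains ch))]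
  funext ch
  by_cases h1 : ch = '|' <;> by_cases h2 : ch = ',' <;> by_cases h3 : ch = ';' <;>
    by_cases h4 : ch = ' ' <;> simp_all

-- the first-occurrence behaviour of split(marker, 1)
theorem go_first (sep : List Char) (hsep : sep ≠ []) (fuel : Nat) :
    ∀ (l cur : List Char) (j : Nat), l.length < fuel →
    sep <+: l.drop j → (∀ i, i < j → ¬ sep <+: l.drop i) →
    PySem.Chars.splitOnMax.go sep fuel 1 l cur [] =
      [cur.reverse ++ l.take j, l.drop (j + sep.length)] := by
  induction fuel with
  | zero => intro l cur j h; omega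
  | succ n ih =>
    intro l cur j hfuel hj hmin
    cases l with
    | nil =>
      exfalso; simp at hj; exact hsep hj
    | cons a t =>
      by_cases hpre : sep <+: (a :: t)
      · have hj0 : j = 0 := by
          by_contra h0
          exact hmin 0 (Nat.pos_of_ne_zero h0) (by simpa using hpre)
        subst hj0
        have hb : sep.isPrefixOf (a :: t) = true := by
          rw [List.isPrefixOf_iff_prefix]; exact hpre
        simp only [PySem.Chars.splitOnMax.go, hb]
        rw [if_pos trivial]
        simp [go_zero]
      · have hj0 : j ≠ 0 := by
          intro h0; subst h0; simp at hj; exact hpre hj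
        obtain ⟨j', rfl⟩ := Nat.exists_eq_succ_of_ne_zero hj0
        have hb : sep.isPrefixOf (a :: t) = false := by
          rw [← Bool.not_eq_true, List.isPrefixOf_iff_prefix]; exact hpre
        simp only [PySem.Chars.splitOnMax.go, hb]
        rw [if_neg (by simp)]
        rw [ih t (a :: cur) j' (by simpa using Nat.lt_of_succ_lt_succ hfuel)
          (by simpa using hj)
          (fun i hi => by simpa using hmin (i + 1) (by omega))]
        simp [Nat.succ_add]

-- split(text, marker, 1)[1] is the suffix after the first occurrence of the marker
theorem splitMarker (text : String) (h : ("finding_key=".toList) <:+: text.toList) :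
    ((PySem.Str.splitMax? text "finding_key=" 1).getD []).getD 1 "" =
      String.ofList (text.toList.drop
        ((PySem.Chars.find text.toList "finding_key=".toList).toNat + 12)) := by
  have hfind : 0 ≤ PySem.Chars.find text.toList "finding_key=".toList :=
    (PySem.Chars.find_nonneg_iff _ _).mpr h
  obtain ⟨hpre, hmin⟩ := PySem.Chars.find_spec hfind
  simp only [PySem.Str.splitMax?, PySem.Chars.splitMax?, PySem.Chars.splitOnMax]
  rw [if_neg (by decide)]
  norm_num
  rw [go_first "finding_key=".toList (by decide) (text.length + 1) text.toList []
    (PySem.Chars.find text.toList "finding_key=".toList).toNat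
    (by rw [String.length_toList]; omega) hpre (fun i hi => hmin i hi)]
  simp

theorem fks_take (l : List Char) :
    l.take (fksScanEnd l) = l.takeWhile (fun ch => !(['|', ',', ';', ' '].contains ch)) := by
  induction l with
  | nil => rfl
  | cons c t ih =>
    by_cases h1 : c = '|' <;> by_cases h2 : c = ',' <;> by_cases h3 : c = ';' <;>
      by_cases h4 : c = ' ' <;> simp_all [fksScanEnd, List.takeWhile]

theorem bSlice (s : String) :
    (PySem.Str.slice s none (some ((fksScanEnd s.toList : Nat) : Int))).toList =
      s.toList.takeWhile (fun ch => !(['|', ',', ';', ' '].contains ch)) := by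
  rw [PySem.Str.toList_slice, PySem.Chars.slice_eq_listSlice,
    PySem.List.slice_to _ (Int.natCast_nonneg _), Int.toNat_natCast, fks_take]

theorem str_eq_of_toList (s t : String) (h : s.toList = t.toList) : s = t := by
  have := congrArg String.ofList h
  simpa using this

theorem core_eq (text : String) :
    (if PySem.Str.isIn "finding_key=" text = false then ""
     else PySem.Str.strip (["|", ",", ";", " "].foldl
        (fun v sep => ((PySem.Str.splitMax? v sep 1).getD []).getD 0 "")
        (((PySem.Str.splitMax? text "finding_key=" 1).getD []).getD 1 ""))) =
    (if PySem.Str.find text "finding_key=" < 0 then ""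
     else PySem.Str.strip (PySem.Str.slice
        (PySem.Str.slice text
          (some (PySem.Str.find text "finding_key=" + (PySem.Str.len "finding_key=" : Int))) none)
        none
        (some ((fksScanEnd (PySem.Str.slice text
          (some (PySem.Str.find text "finding_key=" + (PySem.Str.len "finding_key=" : Int))) none).toList : Nat) : Int)))) := by
  by_cases hin : PySem.Str.isIn "finding_key=" text = true
  · have hinf : ("finding_key=".toList) <:+: text.toList :=
      (PySem.Str.isIn_iff_infix _ _).mp hin
    have hfind : 0 ≤ PySem.Str.find text "finding_key=" := by
      rw [PySem.Str.find_eq]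
      exact (PySem.Chars.find_nonneg_iff _ _).mpr hinf
    rw [if_neg (by simpa using hin), if_neg (by omega)]
    rw [splitMarker text hinf, loop_eq]
    apply congrArg PySem.Str.strip
    apply str_eq_of_toList
    have h12 : (PySem.Str.len ("finding_key=" : String) : Int) = (12 : Int) := by decide
    rw [h12]
    have hslice : (PySem.Str.slice text (some (PySem.Str.find text "finding_key=" + 12)) none).toList
        = text.toList.drop ((PySem.Str.find text "finding_key=").toNat + 12) := by
      rw [PySem.Str.toList_slice, PySem.Chars.slice_eq_listSlice,
        PySem.List.slice_from _ (by omega)]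
      congr 1
      omega
    rw [bSlice, hslice]
    simp [PySem.Str.find_eq]
  · have hfalse : PySem.Str.isIn "finding_key=" text = false := by
      simpa using hin
    have hneg : PySem.Str.find text "finding_key=" = -1 := by
      rw [PySem.Str.find_eq]
      exact (PySem.Chars.find_eq_neg_one_iff _ _).mpr
        (fun hc => hin ((PySem.Str.isIn_iff_infix _ _).mpr hc))
    rw [if_pos hfalse, if_pos (by omega)]

-- ===== VERDICT (by name: the statement is the Claim_ definition above) =====
theorem finding_key_from_source_py_spec : Claim_equal_finding_key_from_source_py := by
  intro source _
  unfold Spec_finding_key_from_source_py finding_key_from_source_py finding_key_from_source_py_alt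
  simp only []
  exact core_eq _
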